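-- pv_equiv track=rewrite | github.com/sspedowski/justice-document-pip | scripts/ai_notes.py | generate_notes_for_contradictions
-- ===== SOURCE A (Python) =====
-- def generate_ai_note(contradiction):
--     """Generate a one-liner AI summary note for a contradiction."""
--     contradiction_type = contradiction.get('type', 'unknown')
--
--     # Rule-specific summary generation
--     if contradiction_type == 'presence_absence_conflict':
--         party = contradiction.get('party', 'party')
--         event = contradiction.get('event', 'event')
--         return f"[Presence] conflict on {party} → simultaneous present/absent at {event}"
--
--     elif contradiction_type == 'event_date_disagreement':
--         event = contradiction.get('event', 'event')
--         date_a = contradiction.get('date_a', 'date1')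
--         date_b = contradiction.get('date_b', 'date2')
--         return f"[Date] conflict on {event} → disputed dates {date_a} vs {date_b}"
--
--     elif contradiction_type == 'numeric_amount_mismatch':
--         event = contradiction.get('event', 'event')
--         amount_a = contradiction.get('amount_a', 'amount1')
--         amount_b = contradiction.get('amount_b', 'amount2')
--         currency = contradiction.get('currency', '')
--         return f"[Amount] conflict on {event} → {amount_a}{currency} vs {amount_b}{currency}"
--
--     elif contradiction_type == 'status_change_inconsistency':
--         case = contradiction.get('case', 'case')
--         status_a = contradiction.get('status_a', 'status1')
--         status_b = contradiction.get('status_b', 'status2')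
--         return f"[Status] conflict on {case} → {status_a} vs {status_b}"
--
--     elif contradiction_type == 'location_contradiction':
--         event = contradiction.get('event', 'event')
--         location_a = contradiction.get('location_a', 'location1')
--         location_b = contradiction.get('location_b', 'location2')
--         person = contradiction.get('person', contradiction.get('party', 'person'))
--         return f"[Location] conflict on {person} → {location_a} vs {location_b} at {event}"
--
--     elif contradiction_type == 'role_responsibility_conflict':
--         event = contradiction.get('event', 'event')
--         role_a = contradiction.get('role_a', 'role1')
--         role_b = contradiction.get('role_b', 'role2')
--         person = contradiction.get('person', contradiction.get('party', 'person'))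
--         return f"[Role] conflict on {person} → {role_a} vs {role_b} in {event}"
--
--     elif contradiction_type == 'date_range_overlap_conflict':
--         event = contradiction.get('event', 'event')
--         return f"[DateRange] conflict on {event} → overlapping time periods"
--
--     elif contradiction_type == '__engine_error__':
--         rule = contradiction.get('rule', 'unknown')
--         return f"[Engine] error in {rule} → analysis failure"
--
--     else:
--         # Generic fallback
--         key = contradiction.get('event', contradiction.get('case', contradiction.get('party', 'unknown')))
--         return f"[{contradiction_type.title()}] conflict on {key} → inconsistent data"
--
-- def generate_notes_for_contradictions(contradictions):
--     """Generate AI notes for a list of contradictions."""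
--     updated_contradictions = []
--
--     for contradiction in contradictions:
--         # Create a copy to avoid modifying the original
--         updated_contradiction = contradiction.copy()
--
--         # Only generate note if missing
--         if 'ai_note' not in updated_contradiction:
--             updated_contradiction['ai_note'] = generate_ai_note(contradiction)
--
--         updated_contradictions.append(updated_contradiction)
--
--     return updated_contradictions
-- ===== SOURCE B (Python) =====
-- # B renders notes from a declarative template table (literal/field pieces interpreted
-- # by a tiny renderer) instead of a per-type branch of hardcoded f-strings.
--
-- # Each template is a list of pieces: ('lit', text) or ('fld', [lookup keys...], default).
-- _TEMPLATES = {
--     'presence_absence_conflict': [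
--         ('lit', '[Presence] conflict on '), ('fld', ['party'], 'party'),
--         ('lit', ' \u2192 simultaneous present/absent at '), ('fld', ['event'], 'event')],
--     'event_date_disagreement': [
--         ('lit', '[Date] conflict on '), ('fld', ['event'], 'event'),
--         ('lit', ' \u2192 disputed dates '), ('fld', ['date_a'], 'date1'),
--         ('lit', ' vs '), ('fld', ['date_b'], 'date2')],
--     'numeric_amount_mismatch': [
--         ('lit', '[Amount] conflict on '), ('fld', ['event'], 'event'),
--         ('lit', ' \u2192 '), ('fld', ['amount_a'], 'amount1'), ('fld', ['currency'], ''),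
--         ('lit', ' vs '), ('fld', ['amount_b'], 'amount2'), ('fld', ['currency'], '')],
--     'status_change_inconsistency': [
--         ('lit', '[Status] conflict on '), ('fld', ['case'], 'case'),
--         ('lit', ' \u2192 '), ('fld', ['status_a'], 'status1'),
--         ('lit', ' vs '), ('fld', ['status_b'], 'status2')],
--     'location_contradiction': [
--         ('lit', '[Location] conflict on '), ('fld', ['person', 'party'], 'person'),
--         ('lit', ' \u2192 '), ('fld', ['location_a'], 'location1'),
--         ('lit', ' vs '), ('fld', ['location_b'], 'location2'),
--         ('lit', ' at '), ('fld', ['event'], 'event')],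
--     'role_responsibility_conflict': [
--         ('lit', '[Role] conflict on '), ('fld', ['person', 'party'], 'person'),
--         ('lit', ' \u2192 '), ('fld', ['role_a'], 'role1'),
--         ('lit', ' vs '), ('fld', ['role_b'], 'role2'),
--         ('lit', ' in '), ('fld', ['event'], 'event')],
--     'date_range_overlap_conflict': [
--         ('lit', '[DateRange] conflict on '), ('fld', ['event'], 'event'),
--         ('lit', ' \u2192 overlapping time periods')],
--     '__engine_error__': [
--         ('lit', '[Engine] error in '), ('fld', ['rule'], 'unknown'),
--         ('lit', ' \u2192 analysis failure')],
-- }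
--
--
-- def _chain_get(c, keys, default):
--     """First present key wins; otherwise the literal default."""
--     for k in keys:
--         if k in c:
--             return c[k]
--     return default
--
--
-- def _render(pieces, c):
--     parts = []
--     for piece in pieces:
--         if piece[0] == 'lit':
--             parts.append(piece[1])
--         else:
--             parts.append(_chain_get(c, piece[1], piece[2]))
--     return ''.join(parts)
--
--
-- def _note(c):
--     t = c.get('type', 'unknown')
--     pieces = _TEMPLATES.get(t)
--     if pieces is None:
--         key = _chain_get(c, ['event', 'case', 'party'], 'unknown')
--         return f"[{t.title()}] conflict on {key} \u2192 inconsistent data"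
--     return _render(pieces, c)
--
--
-- def _annotate(c):
--     updated = dict(c)
--     if 'ai_note' not in updated:
--         updated['ai_note'] = _note(c)
--     return updated
--
--
-- def generate_notes_for_contradictions(contradictions):
--     return [_annotate(c) for c in contradictions]
-- ===== Notes on version B (the rewrite author's own statement) =====
-- stated objective: alternative
-- what changed: Notes are produced by a tiny template interpreter over a declarative table of literal/field pieces (field = lookup-key chain plus default) instead of A's if/elif chain of hardcoded f-strings; the outer accumulator loop becomes a comprehension over a per-item helper.
import Mathlib
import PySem

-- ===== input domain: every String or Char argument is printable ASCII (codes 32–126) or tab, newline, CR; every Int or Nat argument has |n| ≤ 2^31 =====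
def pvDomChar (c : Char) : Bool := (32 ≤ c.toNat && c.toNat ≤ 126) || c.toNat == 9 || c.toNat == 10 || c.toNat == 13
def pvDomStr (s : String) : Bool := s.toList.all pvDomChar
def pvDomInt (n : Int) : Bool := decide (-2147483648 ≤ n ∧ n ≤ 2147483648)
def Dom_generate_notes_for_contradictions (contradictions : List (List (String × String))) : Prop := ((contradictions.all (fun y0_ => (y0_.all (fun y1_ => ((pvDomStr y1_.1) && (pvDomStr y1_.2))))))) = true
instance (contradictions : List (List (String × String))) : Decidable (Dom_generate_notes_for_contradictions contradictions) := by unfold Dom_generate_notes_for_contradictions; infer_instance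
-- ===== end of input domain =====

-- B renders notes with a template interpreter over a declarative piece table instead of
-- A's if/elif chain of hardcoded format strings (alternative decomposition; same cost).

-- Shared primitive (PySem has no str.title): Python s.title(), exact on ASCII letters
-- (a cased char is uppercased after a non-cased char, lowercased otherwise).
def pvCased (c : Char) : Bool := (97 ≤ c.toNat && c.toNat ≤ 122) || (65 ≤ c.toNat && c.toNat ≤ 90)
def pvUp (c : Char) : Char := if 97 ≤ c.toNat && c.toNat ≤ 122 then Char.ofNat (c.toNat - 32) else c
def pvLow (c : Char) : Char := if 65 ≤ c.toNat && c.toNat ≤ 90 then Char.ofNat (c.toNat + 32) else c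
def pvTitleAux : Bool → List Char → List Char
  | _, [] => []
  | prev, c :: cs =>
      (if pvCased c then (if prev then pvLow c else pvUp c) else c) :: pvTitleAux (pvCased c) cs
def pvTitle (s : String) : String := String.ofList (pvTitleAux false s.toList)

-- ===== PORT A =====
def generate_ai_note (c : PySem.Dict String String) : String :=
  let contradiction_type := c.getD "type" "unknown"
  if contradiction_type == "presence_absence_conflict" then
    let party := c.getD "party" "party"
    let event := c.getD "event" "event"
    "[Presence] conflict on " ++ party ++ " → simultaneous present/absent at " ++ event
  else if contradiction_type == "event_date_disagreement" then
    let event := c.getD "event" "event"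
    let date_a := c.getD "date_a" "date1"
    let date_b := c.getD "date_b" "date2"
    "[Date] conflict on " ++ event ++ " → disputed dates " ++ date_a ++ " vs " ++ date_b
  else if contradiction_type == "numeric_amount_mismatch" then
    let event := c.getD "event" "event"
    let amount_a := c.getD "amount_a" "amount1"
    let amount_b := c.getD "amount_b" "amount2"
    let currency := c.getD "currency" ""
    "[Amount] conflict on " ++ event ++ " → " ++ amount_a ++ currency ++ " vs " ++ amount_b ++ currency
  else if contradiction_type == "status_change_inconsistency" then
    let case_ := c.getD "case" "case"
    let status_a := c.getD "status_a" "status1"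
    let status_b := c.getD "status_b" "status2"
    "[Status] conflict on " ++ case_ ++ " → " ++ status_a ++ " vs " ++ status_b
  else if contradiction_type == "location_contradiction" then
    let event := c.getD "event" "event"
    let location_a := c.getD "location_a" "location1"
    let location_b := c.getD "location_b" "location2"
    let person := c.getD "person" (c.getD "party" "person")
    "[Location] conflict on " ++ person ++ " → " ++ location_a ++ " vs " ++ location_b ++ " at " ++ event
  else if contradiction_type == "role_responsibility_conflict" then
    let event := c.getD "event" "event"
    let role_a := c.getD "role_a" "role1"
    let role_b := c.getD "role_b" "role2"
    let person := c.getD "person" (c.getD "party" "person")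
    "[Role] conflict on " ++ person ++ " → " ++ role_a ++ " vs " ++ role_b ++ " in " ++ event
  else if contradiction_type == "date_range_overlap_conflict" then
    let event := c.getD "event" "event"
    "[DateRange] conflict on " ++ event ++ " → overlapping time periods"
  else if contradiction_type == "__engine_error__" then
    let rule := c.getD "rule" "unknown"
    "[Engine] error in " ++ rule ++ " → analysis failure"
  else
    let key := c.getD "event" (c.getD "case" (c.getD "party" "unknown"))
    "[" ++ pvTitle contradiction_type ++ "] conflict on " ++ key ++ " → inconsistent data"

def generate_notes_for_contradictions (contradictions : List (List (String × String))) : List (List (String × String)) :=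
  contradictions.foldl (fun updated_contradictions contradiction =>
    let d := PySem.Dict.mk contradiction
    let d' := if d.contains "ai_note" then d else d.insert "ai_note" (generate_ai_note d)
    updated_contradictions ++ [d'.items]) []

-- ===== PORT B =====
-- A template piece: a literal, or a field with a lookup-key chain and a default.
inductive PvPiece
  | lit : String → PvPiece
  | fld : List String → String → PvPiece
deriving DecidableEq, Repr

def pvTemplates : PySem.Dict String (List PvPiece) :=
  PySem.Dict.mk
    [ ("presence_absence_conflict",
        [.lit "[Presence] conflict on ", .fld ["party"] "party",
         .lit " → simultaneous present/absent at ", .fld ["event"] "event"]),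
      ("event_date_disagreement",
        [.lit "[Date] conflict on ", .fld ["event"] "event",
         .lit " → disputed dates ", .fld ["date_a"] "date1",
         .lit " vs ", .fld ["date_b"] "date2"]),
      ("numeric_amount_mismatch",
        [.lit "[Amount] conflict on ", .fld ["event"] "event",
         .lit " → ", .fld ["amount_a"] "amount1", .fld ["currency"] "",
         .lit " vs ", .fld ["amount_b"] "amount2", .fld ["currency"] ""]),
      ("status_change_inconsistency",
        [.lit "[Status] conflict on ", .fld ["case"] "case",
         .lit " → ", .fld ["status_a"] "status1",
         .lit " vs ", .fld ["status_b"] "status2"]),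
      ("location_contradiction",
        [.lit "[Location] conflict on ", .fld ["person", "party"] "person",
         .lit " → ", .fld ["location_a"] "location1",
         .lit " vs ", .fld ["location_b"] "location2",
         .lit " at ", .fld ["event"] "event"]),
      ("role_responsibility_conflict",
        [.lit "[Role] conflict on ", .fld ["person", "party"] "person",
         .lit " → ", .fld ["role_a"] "role1",
         .lit " vs ", .fld ["role_b"] "role2",
         .lit " in ", .fld ["event"] "event"]),
      ("date_range_overlap_conflict",
        [.lit "[DateRange] conflict on ", .fld ["event"] "event",
         .lit " → overlapping time periods"]),
      ("__engine_error__",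
        [.lit "[Engine] error in ", .fld ["rule"] "unknown",
         .lit " → analysis failure"]) ]

-- Python _chain_get: first PRESENT key wins ('k in c' then 'c[k]'), else the default.
def pvChainGet (c : PySem.Dict String String) : List String → String → String
  | [], dflt => dflt
  | k :: ks, dflt =>
      match c.get? k with
      | some v => v
      | none => pvChainGet c ks dflt

-- ''.join(parts) over the resolved pieces.
def pvJoin : List String → String
  | [] => ""
  | s :: ss => s ++ pvJoin ss

def pvRender (pieces : List PvPiece) (c : PySem.Dict String String) : String :=
  pvJoin (pieces.map (fun piece =>
    match piece with
    | .lit s => s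
    | .fld ks dflt => pvChainGet c ks dflt))

def pvNote (c : PySem.Dict String String) : String :=
  let t := c.getD "type" "unknown"
  match pvTemplates.get? t with
  | none =>
      let key := pvChainGet c ["event", "case", "party"] "unknown"
      "[" ++ pvTitle t ++ "] conflict on " ++ key ++ " → inconsistent data"
  | some pieces => pvRender pieces c

def pvAnnotate (c : List (String × String)) : List (String × String) :=
  let updated := PySem.Dict.mk c
  (if updated.contains "ai_note" then updated
   else updated.insert "ai_note" (pvNote (PySem.Dict.mk c))).items

def generate_notes_for_contradictions_alt (contradictions : List (List (String × String))) : List (List (String × String)) :=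
  contradictions.map pvAnnotate

-- ===== PRECONDITION & SPEC =====
def Spec_generate_notes_for_contradictions (contradictions : List (List (String × String))) (out : List (List (String × String))) : Prop := out = generate_notes_for_contradictions_alt contradictions
instance (contradictions : List (List (String × String))) (out : List (List (String × String))) : Decidable (Spec_generate_notes_for_contradictions contradictions out) := by unfold Spec_generate_notes_for_contradictions; infer_instance

-- ===== CLAIM =====
def Claim_equal_generate_notes_for_contradictions : Prop := ∀ (contradictions : List (List (String × String))), Dom_generate_notes_for_contradictions contradictions → Spec_generate_notes_for_contradictions contradictions (generate_notes_for_contradictions contradictions)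

-- ===== LEMMAS AND PROOFS =====

theorem pvChainGet_cons (c : PySem.Dict String String) (k : String) (ks : List String) (d : String) :
    pvChainGet c (k :: ks) d = (c.get? k).getD (pvChainGet c ks d) := by
  cases h : c.get? k <;> simp [pvChainGet, h]

theorem pvChainGet_one (c : PySem.Dict String String) (k d : String) :
    pvChainGet c [k] d = c.getD k d := by
  rw [pvChainGet_cons, PySem.Dict.getD_eq_get?_getD]; rfl

theorem pvChainGet_two (c : PySem.Dict String String) (k₁ k₂ d : String) :
    pvChainGet c [k₁, k₂] d = c.getD k₁ (c.getD k₂ d) := by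
  rw [pvChainGet_cons, pvChainGet_one]
  simp [PySem.Dict.getD_eq_get?_getD]

theorem pvChainGet_three (c : PySem.Dict String String) (k₁ k₂ k₃ d : String) :
    pvChainGet c [k₁, k₂, k₃] d = c.getD k₁ (c.getD k₂ (c.getD k₃ d)) := by
  rw [pvChainGet_cons, pvChainGet_two]
  simp [PySem.Dict.getD_eq_get?_getD]

-- A's branch chain and B's template interpreter produce the same note on every dict.
theorem pv_note_eq (c : PySem.Dict String String) : generate_ai_note c = pvNote c := by
  unfold generate_ai_note pvNote pvTemplates
  simp only [PySem.Dict.get?_mk_cons, beq_iff_eq]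
  generalize c.getD "type" "unknown" = t
  by_cases h1 : t = "presence_absence_conflict"
  · simp [h1, pvRender, pvJoin, pvChainGet_one, String.append_assoc]
  by_cases h2 : t = "event_date_disagreement"
  · simp [h1, h2, pvRender, pvJoin, pvChainGet_one, String.append_assoc]
  by_cases h3 : t = "numeric_amount_mismatch"
  · simp [h1, h2, h3, pvRender, pvJoin, pvChainGet_one, String.append_assoc]
  by_cases h4 : t = "status_change_inconsistency"
  · simp [h1, h2, h3, h4, pvRender, pvJoin, pvChainGet_one, String.append_assoc]
  by_cases h5 : t = "location_contradiction"
  · simp [h1, h2, h3, h4, h5, pvRender, pvJoin, pvChainGet_one, pvChainGet_two, String.append_assoc]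
  by_cases h6 : t = "role_responsibility_conflict"
  · simp [h1, h2, h3, h4, h5, h6, pvRender, pvJoin, pvChainGet_one, pvChainGet_two, String.append_assoc]
  by_cases h7 : t = "date_range_overlap_conflict"
  · simp [h1, h2, h3, h4, h5, h6, h7, pvRender, pvJoin, pvChainGet_one, String.append_assoc]
  by_cases h8 : t = "__engine_error__"
  · simp [h1, h2, h3, h4, h5, h6, h7, h8, pvRender, pvJoin, pvChainGet_one, String.append_assoc]
  simp [h1, h2, h3, h4, h5, h6, h7, h8, pvChainGet_three, Ne.symm h1, Ne.symm h2, Ne.symm h3, Ne.symm h4, Ne.symm h5, Ne.symm h6, Ne.symm h7,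
    Ne.symm h8, PySem.Dict.get?, String.append_assoc]

-- A's loop body on one item yields exactly B's pvAnnotate of that item.
theorem pv_step_eq (c : List (String × String)) :
    (if (PySem.Dict.mk c).contains "ai_note" then PySem.Dict.mk c
     else (PySem.Dict.mk c).insert "ai_note" (generate_ai_note (PySem.Dict.mk c))).items
      = pvAnnotate c := by
  unfold pvAnnotate
  rw [pv_note_eq]

theorem pv_foldl_append (l : List (List (String × String)))
    (acc : List (List (String × String))) :
    (l.foldl (fun updated_contradictions contradiction =>
        let d := PySem.Dict.mk contradiction
        let d' := if d.contains "ai_note" then d else d.insert "ai_note" (generate_ai_note d)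
        updated_contradictions ++ [d'.items]) acc)
      = acc ++ l.map pvAnnotate := by
  induction l generalizing acc with
  | nil => simp
  | cons x xs ih =>
      rw [List.foldl_cons, ih]
      show (acc ++ [(if (PySem.Dict.mk x).contains "ai_note" then PySem.Dict.mk x
          else (PySem.Dict.mk x).insert "ai_note" (generate_ai_note (PySem.Dict.mk x))).items]) ++
          List.map pvAnnotate xs = acc ++ List.map pvAnnotate (x :: xs)
      rw [pv_step_eq x]
      simp

-- ===== VERDICT =====
theorem generate_notes_for_contradictions_spec : Claim_equal_generate_notes_for_contradictions := by
  intro contradictions _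
  unfold Spec_generate_notes_for_contradictions generate_notes_for_contradictions
    generate_notes_for_contradictions_alt
  exact pv_foldl_append contradictions []
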